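-- pv_equiv track=rewrite | github.com/doanane/Kwanpa-Health-Service | app/services/openai_service.py | _is_food_balanced
-- ===== SOURCE A (Python) =====
-- from typing import Dict, Any, List
--
-- def _is_food_balanced(food_name: str, conditions: List[str]) -> bool:
--     """Check if food is balanced for conditions"""
--     food_lower = food_name.lower()
--
--     # High-carb foods are less balanced for diabetics
--     if any('diabet' in str(c).lower() for c in conditions):
--         if any(starch in food_lower for starch in ['rice', 'omotuo', 'banku', 'fufu', 'yam']):
--             return False
--
--     # High-sodium foods are less balanced for hypertension
--     if any('hypertens' in str(c).lower() or 'blood pressure' in str(c).lower() for c in conditions):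
--         if 'soup' in food_lower or 'stew' in food_lower:
--             return False
--
--     return True
-- ===== SOURCE B (Python) =====
-- def _is_food_balanced(food_name, conditions):
--     """Check if food is balanced for conditions.
--
--     Condition-driven: one pass over conditions accumulates the food
--     substrings banned by each condition; the food is balanced iff none
--     of the accumulated substrings occurs in the lowercased name.
--     """
--     food_lower = food_name.lower()
--     banned = []
--     for c in conditions:
--         cl = str(c).lower()
--         if 'diabet' in cl:
--             banned += ['rice', 'omotuo', 'banku', 'fufu', 'yam']
--         if 'hypertens' in cl or 'blood pressure' in cl:
--             banned += ['soup', 'stew']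
--     return not any(s in food_lower for s in banned)
-- ===== Notes on version B (the rewrite author's own statement) =====
-- stated objective: alternative
-- what changed: Replaced A's two guard blocks (scan conditions, then scan food keywords) by a single condition-driven pass that accumulates the banned food substrings into one list and tests the food name once against it.
import Mathlib
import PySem

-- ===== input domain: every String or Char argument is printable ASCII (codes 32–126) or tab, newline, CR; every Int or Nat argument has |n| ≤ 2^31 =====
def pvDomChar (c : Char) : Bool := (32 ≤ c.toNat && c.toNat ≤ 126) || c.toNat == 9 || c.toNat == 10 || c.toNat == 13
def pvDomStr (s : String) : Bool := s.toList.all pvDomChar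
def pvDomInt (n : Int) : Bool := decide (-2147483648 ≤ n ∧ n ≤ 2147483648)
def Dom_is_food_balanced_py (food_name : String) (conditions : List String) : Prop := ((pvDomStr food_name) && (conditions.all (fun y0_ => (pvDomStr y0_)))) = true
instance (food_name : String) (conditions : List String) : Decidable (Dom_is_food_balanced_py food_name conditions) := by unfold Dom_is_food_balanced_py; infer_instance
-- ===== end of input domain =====

-- B replaces A's two hardcoded guard blocks by one condition-driven pass that
-- accumulates the banned food substrings into a list and tests the food once (objective: alternative).


-- ===== PORT A =====
def is_food_balanced_py (food_name : String) (conditions : List String) : Bool :=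
  let food_lower := PySem.Str.lower food_name
  if conditions.any (fun c => PySem.Str.isIn "diabet" (PySem.Str.lower c)) then
    if ["rice", "omotuo", "banku", "fufu", "yam"].any
        (fun starch => PySem.Str.isIn starch food_lower) then
      false
    else
      goA food_lower conditions
  else
    goA food_lower conditions
where
  -- the second guard block and the final 'return True'
  goA (food_lower : String) (conditions : List String) : Bool :=
    if conditions.any (fun c => PySem.Str.isIn "hypertens" (PySem.Str.lower c) ||
                                PySem.Str.isIn "blood pressure" (PySem.Str.lower c)) then
      if PySem.Str.isIn "soup" food_lower || PySem.Str.isIn "stew" food_lower then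
        false
      else
        true
    else
      true

-- ===== PORT B =====
-- one step of B's loop over conditions, accumulating banned substrings
def bannedStep (acc : List String) (c : String) : List String :=
  let cl := PySem.Str.lower c
  let acc1 := if PySem.Str.isIn "diabet" cl then
                acc ++ ["rice", "omotuo", "banku", "fufu", "yam"]
              else acc
  if PySem.Str.isIn "hypertens" cl || PySem.Str.isIn "blood pressure" cl then
    acc1 ++ ["soup", "stew"]
  else acc1

def is_food_balanced_py_alt (food_name : String) (conditions : List String) : Bool :=
  let food_lower := PySem.Str.lower food_name
  let banned := conditions.foldl bannedStep []
  !(banned.any (fun s => PySem.Str.isIn s food_lower))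

-- ===== PRECONDITION & SPEC =====
def Spec_is_food_balanced_py (food_name : String) (conditions : List String) (out : Bool) : Prop := out = is_food_balanced_py_alt food_name conditions
instance (food_name : String) (conditions : List String) (out : Bool) : Decidable (Spec_is_food_balanced_py food_name conditions out) := by unfold Spec_is_food_balanced_py; infer_instance

-- ===== CLAIM (what is proved, stated in full; the proofs are below) =====
def Claim_equal_is_food_balanced_py : Prop := ∀ (food_name : String) (conditions : List String), Dom_is_food_balanced_py food_name conditions → Spec_is_food_balanced_py food_name conditions (is_food_balanced_py food_name conditions)

-- ===== LEMMAS AND PROOFS =====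

-- one step of B's accumulation, read through List.any
theorem bannedStep_any (acc : List String) (c : String) (p : String → Bool) :
    (bannedStep acc c).any p =
      (acc.any p
        || (PySem.Str.isIn "diabet" (PySem.Str.lower c)
              && ["rice", "omotuo", "banku", "fufu", "yam"].any p)
        || ((PySem.Str.isIn "hypertens" (PySem.Str.lower c) ||
             PySem.Str.isIn "blood pressure" (PySem.Str.lower c))
              && (p "soup" || p "stew"))) := by
  cases hd : PySem.Str.isIn "diabet" (PySem.Str.lower c) <;>
    cases hh : (PySem.Str.isIn "hypertens" (PySem.Str.lower c) ||
                PySem.Str.isIn "blood pressure" (PySem.Str.lower c)) <;>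
      simp_all [bannedStep, List.any_append, Bool.or_assoc]

-- any over the whole accumulated banned list
theorem banned_any (conds : List String) (acc : List String) (p : String → Bool) :
    (conds.foldl bannedStep acc).any p =
      (acc.any p
        || (conds.any (fun c => PySem.Str.isIn "diabet" (PySem.Str.lower c))
              && ["rice", "omotuo", "banku", "fufu", "yam"].any p)
        || (conds.any (fun c => PySem.Str.isIn "hypertens" (PySem.Str.lower c) ||
                                PySem.Str.isIn "blood pressure" (PySem.Str.lower c))
              && (p "soup" || p "stew"))) := by
  induction conds generalizing acc with
  | nil => simp
  | cons c cs ih =>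
    rw [List.foldl_cons, ih (bannedStep acc c), bannedStep_any]
    generalize acc.any p = A
    generalize ["rice", "omotuo", "banku", "fufu", "yam"].any p = S
    generalize (p "soup" || p "stew") = T
    simp only [List.any_cons]
    generalize PySem.Str.isIn "diabet" (PySem.Str.lower c) = d
    generalize (cs.any fun c => PySem.Str.isIn "diabet" (PySem.Str.lower c)) = D
    generalize (PySem.Str.isIn "hypertens" (PySem.Str.lower c) ||
                PySem.Str.isIn "blood pressure" (PySem.Str.lower c)) = h
    generalize (cs.any fun c => PySem.Str.isIn "hypertens" (PySem.Str.lower c) ||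
                                PySem.Str.isIn "blood pressure" (PySem.Str.lower c)) = H
    cases A <;> cases d <;> cases D <;> cases h <;> cases H <;> cases S <;> cases T <;> rfl

-- ===== VERDICT (by name: the statement is the Claim_ definition above) =====
theorem is_food_balanced_py_spec : Claim_equal_is_food_balanced_py := by
  intro food_name conditions _
  unfold Spec_is_food_balanced_py is_food_balanced_py is_food_balanced_py.goA is_food_balanced_py_alt
  simp only [banned_any, List.any_nil, Bool.false_or]
  cases hd : conditions.any (fun c => PySem.Str.isIn "diabet" (PySem.Str.lower c)) <;>
    cases hh : conditions.any (fun c => PySem.Str.isIn "hypertens" (PySem.Str.lower c) ||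
                                        PySem.Str.isIn "blood pressure" (PySem.Str.lower c)) <;>
      cases hs : ["rice", "omotuo", "banku", "fufu", "yam"].any
                   (fun starch => PySem.Str.isIn starch (PySem.Str.lower food_name)) <;>
        cases ht : (PySem.Str.isIn "soup" (PySem.Str.lower food_name) ||
                    PySem.Str.isIn "stew" (PySem.Str.lower food_name)) <;>
          simp
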